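-- pv_equiv track=rewrite | github.com/reyley/advent_of_code | src/2024/day_5/part_2.py | middle_page
-- ===== SOURCE A (Python) =====
-- from functools import cmp_to_key
--
-- def middle_page(manual, rules):
--     is_good = True
--     for i in range(len(manual)):
--         for j in range(i + 1, len(manual)):
--             if f"{manual[j]}|{manual[i]}" in rules:
--                 is_good = False
--     if is_good:
--         return 0
--
--     def comp(num1,num2):
--         if f"{num1}|{num2}" in rules:
--             return -1
--         elif f"{num2}|{num1}" in rules:
--             return 1
--         return 0
--
--     manual = sorted(manual, key=cmp_to_key(comp))
--
--     assert len(manual) % 2 == 1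
--     return manual[(len(manual)-1)//2]
-- ===== SOURCE B (Python) =====
-- def middle_page(manual, rules):
--     count = {}   # occurrences of each page, keyed by str(page)
--     first = {}   # index of the first occurrence of each page
--     last = {}    # index of the last occurrence of each page
--     for i, x in enumerate(manual):
--         s = str(x)
--         count[s] = count.get(s, 0) + 1
--         if s not in first:
--             first[s] = i
--         last[s] = i
--     pred = {}    # pred[s] = how many pages of the manual must come before page s
--     ordered = True
--     for r in set(rules):
--         cut = r.find('|')
--         if cut != -1:
--             a, b = r[:cut], r[cut + 1:]
--             if a in count and b in count:
--                 pred[b] = pred.get(b, 0) + count[a]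
--                 if first[b] < last[a]:
--                     ordered = False
--     if ordered:
--         return 0
--     half = (len(manual) - 1) // 2
--     return next(x for x in manual if pred.get(str(x), 0) == half)
-- ===== Notes on version B (the rewrite author's own statement) =====
-- stated objective: faster
-- what changed: B never scans pairs nor sorts: one pass over the manual records each page's multiplicity and first/last index, one pass over the distinct rules parses each rule at its '|' and both checks the ordering (first[b] < last[a] detects a violated pair) and accumulates predecessor counts, and the middle page is the one preceded by exactly (n-1)//2 pages.
-- outside the precondition, e.g. on middle_page([1, 2, 3], {'3|1'}): A returns 2, B returns 1; on middle_page([2, 1, 1], {'1|2'}): A returns 1, B raises StopIteration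
import Mathlib
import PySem

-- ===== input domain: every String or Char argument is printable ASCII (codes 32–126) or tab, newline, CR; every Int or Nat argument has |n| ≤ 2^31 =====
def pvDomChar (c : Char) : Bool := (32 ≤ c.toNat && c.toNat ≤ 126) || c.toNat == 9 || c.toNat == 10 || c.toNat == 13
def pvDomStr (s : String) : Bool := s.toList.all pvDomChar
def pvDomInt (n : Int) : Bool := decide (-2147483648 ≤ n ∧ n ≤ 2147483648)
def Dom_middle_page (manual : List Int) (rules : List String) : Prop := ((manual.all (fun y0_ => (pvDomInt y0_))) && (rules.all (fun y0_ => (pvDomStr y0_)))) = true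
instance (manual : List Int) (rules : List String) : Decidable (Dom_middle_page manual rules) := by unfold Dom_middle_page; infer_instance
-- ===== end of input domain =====

-- B replaces A's quadratic pair scan and comparator sort by one pass over the manual
-- (multiplicity, first and last index per page) and one pass over the distinct rules
-- (ordering check and predecessor counts); measured faster in a timing run.

-- shared formatter: f"{a}|{b}"
def ruleStr (a b : Int) : String := PySem.Int.toStr a ++ "|" ++ PySem.Int.toStr b

-- ===== PORT A =====
def compA (rules : List String) (a b : Int) : Int :=
  if rules.contains (ruleStr a b) then -1
  else if rules.contains (ruleStr b a) then 1
  else 0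

def insertCompA (rules : List String) (x : Int) : List Int → List Int
  | [] => [x]
  | y :: ys => if compA rules x y < 0 then x :: y :: ys else y :: insertCompA rules x ys

-- sorted(manual, key=cmp_to_key(comp)): a stable comparator sort, ported as insertion sort;
-- exact under Pre_ (there the comparator is a strict total order on the distinct pages, so the
-- sorted permutation is unique and every sort algorithm returns it)
def sortCompA (rules : List String) : List Int → List Int
  | [] => []
  | x :: xs => insertCompA rules x (sortCompA rules xs)

def middle_page (manual : List Int) (rules : List String) : Int :=
  let n : Int := manual.length
  let isGood := (PySem.List.pyRange 0 n 1).foldl (fun g i =>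
    (PySem.List.pyRange (i + 1) n 1).foldl (fun g j =>
      if rules.contains (ruleStr (PySem.List.pyGetD manual j 0) (PySem.List.pyGetD manual i 0))
      then false else g) g) true
  if isGood then 0
  else
    let m := sortCompA rules manual
    -- `assert len(manual) % 2 == 1` raises AssertionError on even length: excluded by Pre_
    PySem.List.pyGetD m (PySem.Int.floordiv ((m.length : Int) - 1) 2) 0

-- ===== PORT B =====
def middle_page_alt (manual : List Int) (rules : List String) : Int :=
  let cfl := (PySem.List.enumerate manual).foldl
    (fun (cfl : (PySem.Dict String Int × PySem.Dict String Int) × PySem.Dict String Int) p =>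
      ((cfl.1.1.insert (PySem.Int.toStr p.2) (cfl.1.1.getD (PySem.Int.toStr p.2) 0 + 1),
        if cfl.1.2.contains (PySem.Int.toStr p.2) then cfl.1.2
        else cfl.1.2.insert (PySem.Int.toStr p.2) p.1),
       cfl.2.insert (PySem.Int.toStr p.2) p.1))
    ((PySem.Dict.empty, PySem.Dict.empty), PySem.Dict.empty)
  let count := cfl.1.1
  let first := cfl.1.2
  let last := cfl.2
  let po := (PySem.Set.ofList rules).foldl
    (fun (po : PySem.Dict String Int × Bool) r =>
      let cut := PySem.Str.find r "|"
      if cut ≠ -1 then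
        let a := PySem.Str.slice r none (some cut)
        let b := PySem.Str.slice r (some (cut + 1)) none
        if count.contains a && count.contains b then
          -- first[b] / last[a]: KeyError impossible (a, b are keys of count, hence of first/last)
          (po.1.insert b (po.1.getD b 0 + count.getD a 0),
           if first.getD b 0 < last.getD a 0 then false else po.2)
        else po
      else po)
    (PySem.Dict.empty, true)
  if po.2 then 0
  else
    let half : Int := PySem.Int.floordiv ((manual.length : Int) - 1) 2
    -- `next(...)` raises StopIteration when no page matches: unreachable under Pre_
    (manual.find? (fun x => po.1.getD (PySem.Int.toStr x) 0 == half)).getD 0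

-- ===== PRECONDITION & SPEC =====
def ordR (rules : List String) (a b : Int) : Bool := rules.contains (ruleStr a b)

-- Pre_ excludes inputs where A raises AssertionError (an unordered manual of even length) and the
-- defensible corners where an unordered manual has duplicate pages or the rules are not a strict
-- total order on its pages, so that the result of sorting with the inconsistent comparator is an
-- accident of the sort implementation.
def Pre_middle_page (manual : List Int) (rules : List String) : Prop :=
  manual.Pairwise (fun a b => ordR rules b a = false) ∨
  (manual.length % 2 = 1 ∧ manual.Nodup ∧
   (∀ a ∈ manual, ordR rules a a = false) ∧
   (∀ a ∈ manual, ∀ b ∈ manual, a ≠ b → (ordR rules a b = true ↔ ordR rules b a = false)) ∧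
   (∀ a ∈ manual, ∀ b ∈ manual, ∀ c ∈ manual,
     ordR rules a b = true → ordR rules b c = true → ordR rules a c = true))
instance (manual : List Int) (rules : List String) : Decidable (Pre_middle_page manual rules) := by
  unfold Pre_middle_page; infer_instance

def pvWitness_middle_page : List Int × List String := ([3, 2, 1], ["2|3", "1|2", "1|3"])

def Spec_middle_page (manual : List Int) (rules : List String) (out : Int) : Prop := out = middle_page_alt manual rules
instance (manual : List Int) (rules : List String) (out : Int) : Decidable (Spec_middle_page manual rules out) := by unfold Spec_middle_page; infer_instance

-- ===== CLAIM (what is proved, stated in full; the proofs are below) =====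
def Claim_equal_middle_page : Prop := ∀ (manual : List Int) (rules : List String), Dom_middle_page manual rules → Pre_middle_page manual rules → Spec_middle_page manual rules (middle_page manual rules)

-- ===== LEMMAS AND PROOFS =====

-- A's flag-setting inner loop is a negated `any`
theorem foldl_flag {α : Type} (p : α → Bool) (l : List α) (g : Bool) :
    l.foldl (fun g y => if p y then false else g) g = (g && !l.any p) := by
  induction l generalizing g with
  | nil => simp
  | cons y ys ih =>
    rw [List.foldl_cons]
    by_cases h : p y = true
    · rw [if_pos h, ih, List.any_cons, h]
      simp
    · have hf : p y = false := by simpa using h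
      rw [if_neg h, ih, List.any_cons, hf]
      simp

-- A's outer accumulation of the flag is an `all`
theorem foldl_and {α : Type} (q : α → Bool) (l : List α) (g : Bool) :
    l.foldl (fun g i => g && q i) g = (g && l.all q) := by
  induction l generalizing g with
  | nil => simp
  | cons i is ih => simp [List.foldl_cons, ih, Bool.and_assoc]

-- the shared "manual is already ordered" condition, as both loops compute it
theorem good_iff_pairwise (manual : List Int) (rules : List String) (g : Int → Int → Bool)
    (hall : ∀ k : Nat, (hk : k < manual.length) →
      ((manual.drop (k+1)).any (fun y => g y manual[k])) = false) :
    manual.Pairwise (fun a b => g b a = false) := by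
  rw [List.pairwise_iff_getElem]
  intro i j hi hj hij
  have h := hall i hi
  rw [List.any_eq_false] at h
  have hmem : manual[j] ∈ manual.drop (i+1) := by
    have : manual[j] = (manual.drop (i+1))[j - (i+1)]'(by simp; omega) := by
      rw [List.getElem_drop]; congr 1; omega
    rw [this]; exact List.getElem_mem _
  simpa using h manual[j] hmem

theorem pairwise_good (manual : List Int) (rules : List String) (g : Int → Int → Bool)
    (hp : manual.Pairwise (fun a b => g b a = false)) (k : Nat) (hk : k < manual.length) :
    ((manual.drop (k+1)).any (fun y => g y manual[k])) = false := by
  rw [List.any_eq_false]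
  intro y hy
  rw [List.mem_iff_getElem] at hy
  obtain ⟨m, hm, rfl⟩ := hy
  rw [List.getElem_drop]
  have hlen : k + 1 + m < manual.length := by
    have := hm; simp at this; omega
  simpa using (List.pairwise_iff_getElem.mp hp) k (k+1+m) hk hlen (by omega)

-- A's nested index loops compute the Pairwise condition
theorem flagA_iff (manual : List Int) (rules : List String) :
    ((PySem.List.pyRange 0 (manual.length : Int) 1).foldl (fun g i =>
      (PySem.List.pyRange (i + 1) (manual.length : Int) 1).foldl (fun g j =>
        if rules.contains (ruleStr (PySem.List.pyGetD manual j 0) (PySem.List.pyGetD manual i 0))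
        then false else g) g) true) = true
    ↔ manual.Pairwise (fun a b => ordR rules b a = false) := by
  rw [PySem.List.pyRange_zero_natCast, List.foldl_map]
  have hstep : ∀ (g : Bool) (k : Nat),
      ((PySem.List.pyRange ((k : Int) + 1) (manual.length : Int) 1).foldl (fun g j =>
        if rules.contains (ruleStr (PySem.List.pyGetD manual j 0) (PySem.List.pyGetD manual (k : Int) 0))
        then false else g) g)
      = (g && !((manual.drop (k+1)).any (fun y => ordR rules y (manual.getD k 0)))) := by
    intro g k
    rw [PySem.List.foldl_pyRange_pyGetD' manual 0
        (fun g y => if rules.contains (ruleStr y (PySem.List.pyGetD manual (k : Int) 0)) then false else g)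
        g (by omega : (0:Int) ≤ (k : Int) + 1)]
    have : ((k : Int) + 1).toNat = k + 1 := by omega
    rw [this, foldl_flag]
    simp [PySem.List.pyGetD_natCast, ordR]
  simp only [hstep]
  rw [foldl_and]
  simp only [Bool.true_and, List.all_eq_true, List.mem_range, Bool.not_eq_eq_eq_not, Bool.not_true]
  constructor
  · intro h
    exact good_iff_pairwise manual rules (ordR rules) (fun k hk => by
      have := h k hk
      rwa [List.getD_eq_getElem manual 0 hk] at this)
  · intro hp k hk
    rw [List.getD_eq_getElem manual 0 hk]
    exact pairwise_good manual rules (ordR rules) hp k hk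

-- membership and permutation facts about A's insertion sort
theorem mem_insertCompA (rules : List String) (x z : Int) (l : List Int) :
    z ∈ insertCompA rules x l ↔ z = x ∨ z ∈ l := by
  induction l with
  | nil => simp [insertCompA]
  | cons y ys ih =>
    simp only [insertCompA]
    split <;> simp [ih] <;> tauto

theorem perm_insertCompA (rules : List String) (x : Int) (l : List Int) :
    (insertCompA rules x l).Perm (x :: l) := by
  induction l with
  | nil => simp [insertCompA]
  | cons y ys ih =>
    simp only [insertCompA]
    split
    · exact List.Perm.refl _
    · exact (List.Perm.cons y ih).trans (List.Perm.swap x y ys)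

theorem perm_sortCompA (rules : List String) (l : List Int) :
    (sortCompA rules l).Perm l := by
  induction l with
  | nil => simp [sortCompA]
  | cons x xs ih =>
    exact (perm_insertCompA rules x (sortCompA rules xs)).trans (List.Perm.cons x ih)

-- comparator sign: comp x y < 0 exactly when the rule "x|y" is present
theorem compA_lt_zero (rules : List String) (x y : Int) :
    (compA rules x y < 0) ↔ ordR rules x y = true := by
  unfold compA ordR
  split <;> rename_i h
  · exact ⟨fun _ => h, fun _ => by norm_num⟩
  · split <;> rename_i h2
    · exact ⟨fun hlt => absurd hlt (by norm_num), fun hc => absurd hc h⟩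
    · exact ⟨fun hlt => absurd hlt (by norm_num), fun hc => absurd hc h⟩

-- inserting a fresh page into an ordered list keeps it ordered (under the local strict total order)
theorem pairwise_insertCompA (rules : List String) (manual : List Int)
    (hT : ∀ a ∈ manual, ∀ b ∈ manual, a ≠ b → (ordR rules a b = true ↔ ordR rules b a = false))
    (hTr : ∀ a ∈ manual, ∀ b ∈ manual, ∀ c ∈ manual,
      ordR rules a b = true → ordR rules b c = true → ordR rules a c = true)
    (x : Int) (l : List Int)
    (hsub : ∀ z ∈ l, z ∈ manual) (hx : x ∈ manual) (hnx : x ∉ l)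
    (hnd : l.Nodup)
    (hp : l.Pairwise (fun a b => ordR rules a b = true)) :
    (insertCompA rules x l).Pairwise (fun a b => ordR rules a b = true) := by
  induction l with
  | nil => simp [insertCompA]
  | cons y ys ih =>
    have hy : y ∈ manual := hsub y (by simp)
    have hxy : x ≠ y := by intro h; exact hnx (h ▸ List.mem_cons_self)
    simp only [insertCompA]
    split <;> rename_i hc
    · rw [compA_lt_zero] at hc
      constructor
      · intro z hz
        rcases List.mem_cons.mp hz with rfl | hz'
        · exact hc
        · exact hTr x hx y hy z (hsub z (by simp [hz']))
            hc ((List.pairwise_cons.mp hp).1 z hz')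
      · exact hp
    · rw [compA_lt_zero] at hc
      have hyx : ordR rules x y = false := by
        rcases h : ordR rules x y with _ | _
        · rfl
        · exact absurd h hc
      have hordyx : ordR rules y x = true := (hT y hy x hx hxy.symm).mpr hyx
      rw [List.pairwise_cons] at hp
      constructor
      · intro z hz
        rw [mem_insertCompA] at hz
        rcases hz with rfl | hz'
        · exact hordyx
        · exact hp.1 z hz'
      · exact ih (fun z hz => hsub z (by simp [hz])) (fun h => hnx (by simp [h]))
          (List.nodup_cons.mp hnd).2 hp.2

theorem pairwise_sortCompA (rules : List String) (manual : List Int)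
    (hT : ∀ a ∈ manual, ∀ b ∈ manual, a ≠ b → (ordR rules a b = true ↔ ordR rules b a = false))
    (hTr : ∀ a ∈ manual, ∀ b ∈ manual, ∀ c ∈ manual,
      ordR rules a b = true → ordR rules b c = true → ordR rules a c = true)
    (l : List Int) (hsub : ∀ z ∈ l, z ∈ manual) (hnd : l.Nodup) :
    (sortCompA rules l).Pairwise (fun a b => ordR rules a b = true) := by
  induction l with
  | nil => simp [sortCompA]
  | cons x xs ih =>
    have hnd' := List.nodup_cons.mp hnd
    apply pairwise_insertCompA rules manual hT hTr x _
      (fun z hz => hsub z (by simp [(perm_sortCompA rules xs).mem_iff.mp hz]))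
      (hsub x (by simp))
      (fun h => hnd'.1 ((perm_sortCompA rules xs).mem_iff.mp h))
      ((perm_sortCompA rules xs).nodup_iff.mpr hnd'.2)
      (ih (fun z hz => hsub z (by simp [hz])) hnd'.2)

-- in an ordered list, the page at index k is preceded by exactly k pages
theorem countP_eq_index (rules : List String) (manual : List Int) (s : List Int)
    (hsub : ∀ z ∈ s, z ∈ manual)
    (hI : ∀ a ∈ manual, ordR rules a a = false)
    (hT : ∀ a ∈ manual, ∀ b ∈ manual, a ≠ b → (ordR rules a b = true ↔ ordR rules b a = false))
    (hp : s.Pairwise (fun a b => ordR rules a b = true))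
    (k : Nat) (hk : k < s.length) :
    s.countP (fun y => ordR rules y s[k]) = k := by
  have hdecomp : s = s.take k ++ s[k] :: s.drop (k+1) := by
    conv_lhs => rw [← List.take_append_drop k s]
    congr 1
    exact (List.getElem_cons_drop hk).symm
  obtain ⟨v, hveq⟩ : ∃ v, s[k] = v := ⟨_, rfl⟩
  have hvmem : v ∈ s := hveq ▸ List.getElem_mem hk
  rw [hveq] at hdecomp ⊢
  conv_lhs => rw [hdecomp]
  rw [List.countP_append, List.countP_cons]
  have hpg := List.pairwise_iff_getElem.mp hp
  have hself : ordR rules v v = false := hI v (hsub v hvmem)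
  have h1 : (s.take k).countP (fun y => ordR rules y v) = k := by
    rw [List.countP_eq_length.mpr, List.length_take]
    · omega
    · intro y hy
      rw [List.mem_iff_getElem] at hy
      obtain ⟨i, hi, rfl⟩ := hy
      rw [List.getElem_take]
      have hi' : i < k := by simp at hi; omega
      have := hpg i k (by omega) hk hi'
      rw [hveq] at this
      simpa using this
  have h2 : (s.drop (k+1)).countP (fun y => ordR rules y v) = 0 := by
    rw [List.countP_eq_zero]
    intro y hy
    rw [List.mem_iff_getElem] at hy
    obtain ⟨i, hi, rfl⟩ := hy
    rw [List.getElem_drop]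
    have hlen : k + 1 + i < s.length := by simp at hi; omega
    have hord : ordR rules v (s[k+1+i]'hlen) = true := by
      have := hpg k (k+1+i) hk hlen (by omega)
      rwa [hveq] at this
    have hne : (s[k+1+i]'hlen) ≠ v := by
      intro h
      rw [h] at hord
      rw [hord] at hself
      exact absurd hself (by simp)
    have := (hT v (hsub v hvmem) (s[k+1+i]'hlen) (hsub _ (List.getElem_mem _))
      (fun h => hne h.symm)).mp hord
    simpa using this
  rw [h1, h2, hself]
  simp

-- find? over a list where every match equals v returns v
theorem find?_eq_some_of {α : Type} (p : α → Bool) (l : List α) (v : α)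
    (hex : ∃ x ∈ l, p x = true) (huniq : ∀ x ∈ l, p x = true → x = v) :
    l.find? p = some v := by
  induction l with
  | nil => simp at hex
  | cons x xs ih =>
    rcases h : p x with _ | _
    · rw [List.find?_cons_of_neg (by simp [h])]
      apply ih
      · obtain ⟨z, hz, hpz⟩ := hex
        rcases List.mem_cons.mp hz with rfl | hz'
        · rw [h] at hpz; exact absurd hpz (by simp)
        · exact ⟨z, hz', hpz⟩
      · exact fun z hz hpz => huniq z (by simp [hz]) hpz
    · rw [List.find?_cons_of_pos h]
      rw [huniq x (by simp) h]


-- ----- proof-side names for B's loop bodies and dictionaries -----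
def cStep (d : PySem.Dict String Int) (p : Int × Int) : PySem.Dict String Int :=
  d.insert (PySem.Int.toStr p.2) (d.getD (PySem.Int.toStr p.2) 0 + 1)
def fStep (d : PySem.Dict String Int) (p : Int × Int) : PySem.Dict String Int :=
  if d.contains (PySem.Int.toStr p.2) then d else d.insert (PySem.Int.toStr p.2) p.1
def lStep (d : PySem.Dict String Int) (p : Int × Int) : PySem.Dict String Int :=
  d.insert (PySem.Int.toStr p.2) p.1
def countD (manual : List Int) : PySem.Dict String Int :=
  (PySem.List.enumerate manual).foldl cStep PySem.Dict.empty
def firstD (manual : List Int) : PySem.Dict String Int :=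
  (PySem.List.enumerate manual).foldl fStep PySem.Dict.empty
def lastD (manual : List Int) : PySem.Dict String Int :=
  (PySem.List.enumerate manual).foldl lStep PySem.Dict.empty
def keyA (r : String) : String := PySem.Str.slice r none (some (PySem.Str.find r "|"))
def keyB (r : String) : String := PySem.Str.slice r (some (PySem.Str.find r "|" + 1)) none
def qual2 (manual : List Int) (r : String) : Bool :=
  decide (PySem.Str.find r "|" ≠ -1)
    && ((countD manual).contains (keyA r) && (countD manual).contains (keyB r))
def qualInv (manual : List Int) (r : String) : Bool :=
  qual2 manual r && decide ((firstD manual).getD (keyB r) 0 < (lastD manual).getD (keyA r) 0)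
def predStep (manual : List Int) (d : PySem.Dict String Int) (r : String) : PySem.Dict String Int :=
  if qual2 manual r then d.insert (keyB r) (d.getD (keyB r) 0 + (countD manual).getD (keyA r) 0)
  else d
def predD (manual : List Int) (rules : List String) : PySem.Dict String Int :=
  (PySem.Set.ofList rules).foldl (predStep manual) PySem.Dict.empty

-- the three-dictionary loop is three independent loops
theorem foldl_step3 (xs : List (Int × Int))
    (c f l : PySem.Dict String Int) :
    xs.foldl (fun cfl p => ((cStep cfl.1.1 p, fStep cfl.1.2 p), lStep cfl.2 p)) ((c, f), l)
      = ((xs.foldl cStep c, xs.foldl fStep f), xs.foldl lStep l) := by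
  induction xs generalizing c f l with
  | nil => rfl
  | cons p ps ih => simp [List.foldl_cons, ih]

-- the (pred, ordered) loop is two independent loops
theorem foldl_po (manual : List Int) (l : List String) (d : PySem.Dict String Int) (b : Bool) :
    l.foldl (fun po r =>
      if PySem.Str.find r "|" ≠ -1 then
        if (countD manual).contains (keyA r) && (countD manual).contains (keyB r) then
          (po.1.insert (keyB r) (po.1.getD (keyB r) 0 + (countD manual).getD (keyA r) 0),
           if (firstD manual).getD (keyB r) 0 < (lastD manual).getD (keyA r) 0 then false
           else po.2)
        else po
      else po) (d, b)
    = (l.foldl (predStep manual) d,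
       l.foldl (fun g r => if qualInv manual r then false else g) b) := by
  induction l generalizing d b with
  | nil => rfl
  | cons r rs ih =>
    rw [List.foldl_cons, List.foldl_cons, List.foldl_cons]
    have hstep :
        (if PySem.Str.find r "|" ≠ -1 then
          if (countD manual).contains (keyA r) && (countD manual).contains (keyB r) then
            ((d, b).1.insert (keyB r) ((d, b).1.getD (keyB r) 0 + (countD manual).getD (keyA r) 0),
             if (firstD manual).getD (keyB r) 0 < (lastD manual).getD (keyA r) 0 then false
             else (d, b).2)
          else (d, b)
        else (d, b))
        = (predStep manual d r, if qualInv manual r then false else b) := by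
      by_cases h1 : PySem.Str.find r "|" ≠ -1
      · rw [if_pos h1]
        by_cases h2 : ((countD manual).contains (keyA r) && (countD manual).contains (keyB r)) = true
        · rw [if_pos h2]
          have hq2 : qual2 manual r = true := by
            unfold qual2
            rw [h2, decide_eq_true h1]
            rfl
          unfold predStep qualInv
          rw [if_pos hq2, hq2]
          by_cases h3 : (firstD manual).getD (keyB r) 0 < (lastD manual).getD (keyA r) 0
          · rw [if_pos h3, if_pos (by rw [decide_eq_true h3]; rfl)]
          · rw [if_neg h3, if_neg (by rw [decide_eq_false h3]; simp)]
        · rw [if_neg h2]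
          have hq2 : qual2 manual r = false := by
            unfold qual2
            rw [Bool.not_eq_true] at h2
            rw [h2, Bool.and_false]
          unfold predStep qualInv
          rw [if_neg (by rw [hq2]; simp), hq2, Bool.false_and, if_neg (by simp)]
      · rw [if_neg h1]
        have hq2 : qual2 manual r = false := by
          unfold qual2
          rw [decide_eq_false h1, Bool.false_and]
        unfold predStep qualInv
        rw [if_neg (by rw [hq2]; simp), hq2, Bool.false_and, if_neg (by simp)]
    rw [hstep, ih]

-- B's ordered flag is the negated `any` of the inversion test
theorem ordered_eq_any (manual : List Int) (l : List String) :
    l.foldl (fun g r => if qualInv manual r then false else g) true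
      = !(l.any (qualInv manual)) := by
  rw [foldl_flag]
  simp

-- a loop over (index, x) that only uses str(x) is a loop over the string forms
theorem foldl_enum_snd {beta : Type} (step : beta → String → beta) (xs : List Int) :
    ∀ (k : Int) (init : beta),
    (PySem.List.enumerate xs k).foldl (fun d p => step d (PySem.Int.toStr p.2)) init
      = (xs.map PySem.Int.toStr).foldl step init := by
  induction xs with
  | nil => intro k init; rfl
  | cons x xs ih =>
    intro k init
    rw [PySem.List.enumerate_cons, List.foldl_cons, List.map_cons, List.foldl_cons, ih]

-- ----- the count dictionary counts string forms of the pages -----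
theorem countD_eq (manual : List Int) :
    countD manual = (manual.map PySem.Int.toStr).foldl
      (fun d x => d.insert x (d.getD x 0 + 1)) PySem.Dict.empty := by
  unfold countD
  rw [show cStep = (fun (d : PySem.Dict String Int) (p : Int × Int) =>
    (fun (d : PySem.Dict String Int) (x : String) => d.insert x (d.getD x 0 + 1)) d
      (PySem.Int.toStr p.2)) from rfl]
  exact foldl_enum_snd (fun (d : PySem.Dict String Int) (x : String) => d.insert x (d.getD x 0 + 1)) manual 0 PySem.Dict.empty

theorem countD_getD (manual : List Int) (s : String) :
    (countD manual).getD s 0 = ((manual.map PySem.Int.toStr).count s : Int) := by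
  rw [countD_eq, PySem.Dict.getD_foldl_insert_add_one]
  simp

theorem countD_contains (manual : List Int) (s : String) :
    (countD manual).contains s = true ↔ s ∈ manual.map PySem.Int.toStr := by
  rw [countD_eq, PySem.Dict.contains_iff_mem_keys,
    PySem.Dict.keys_foldl_insert (manual.map PySem.Int.toStr) _ PySem.Dict.empty]
  rw [show PySem.Dict.empty.keys = ([] : List String) from rfl]
  rw [show PySem.Set.update ([] : List String) (manual.map PySem.Int.toStr)
      = PySem.Set.ofList (manual.map PySem.Int.toStr) from rfl]
  exact PySem.Set.mem_ofList _ _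

-- ----- first/last dictionaries: stored value is the first/last index of the page string -----
theorem lFold_spec (s : String) (xs : List Int) : ∀ (k : Int) (d : PySem.Dict String Int),
    (s ∉ xs.map PySem.Int.toStr →
      ((PySem.List.enumerate xs k).foldl lStep d).get? s = d.get? s)
    ∧ (s ∈ xs.map PySem.Int.toStr →
      ∃ i : Nat, i < xs.length ∧ (xs.map PySem.Int.toStr)[i]? = some s
        ∧ (∀ j : Nat, i < j → (xs.map PySem.Int.toStr)[j]? ≠ some s)
        ∧ ((PySem.List.enumerate xs k).foldl lStep d).get? s = some (k + i)) := by
  induction xs using List.reverseRecOn with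
  | nil => intro k d; exact ⟨fun _ => rfl, fun h => by simp at h⟩
  | append_singleton xs x ih =>
    intro k d
    rw [PySem.List.enumerate_append]
    have h1 : PySem.List.enumerate [x] (k + xs.length) = [(k + xs.length, x)] := by
      rw [PySem.List.enumerate_cons]; rfl
    rw [h1, List.foldl_append]
    set F := (PySem.List.enumerate xs k).foldl lStep d with hF
    have hlast : List.foldl lStep F [(k + ↑xs.length, x)] = F.insert (PySem.Int.toStr x) (k + xs.length) := rfl
    rw [hlast]
    by_cases hsx : s = PySem.Int.toStr x
    · subst hsx
      constructor
      · intro hmem; exact absurd (by simp) hmem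
      · intro _
        refine ⟨xs.length, by simp, ?_, ?_, ?_⟩
        · simp
        · intro j hj
          simp only [List.map_append, List.map_cons, List.map_nil]
          intro hcon
          rw [List.getElem?_eq_some_iff] at hcon
          obtain ⟨hjl, _⟩ := hcon
          simp at hjl; omega
        · rw [PySem.Dict.get?_insert_self]
    · constructor
      · intro hmem
        rw [PySem.Dict.get?_insert_of_ne _ _ hsx]
        exact (ih k d).1 (fun h => hmem (by simp [h]))
      · intro hmem
        rw [List.map_append] at hmem
        have hmem' : s ∈ xs.map PySem.Int.toStr := by
          rcases List.mem_append.mp hmem with h | h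
          · exact h
          · simp at h; exact absurd h hsx
        obtain ⟨i, hi, hgi, hmax, hget⟩ := (ih k d).2 hmem'
        refine ⟨i, by simp; omega, ?_, ?_, ?_⟩
        · rw [List.map_append, List.getElem?_append_left (by simpa using hi)]
          exact hgi
        · intro j hj
          rw [List.map_append]
          by_cases hjl : j < xs.length
          · rw [List.getElem?_append_left (by simpa using hjl)]
            exact hmax j hj
          · by_cases hje : j = xs.length
            · subst hje
              rw [List.getElem?_append_right (by simp)]
              simp [hsx]
              intro hcon
              exact hsx hcon.symm
            · rw [List.getElem?_eq_none_iff.mpr (by simp; omega)]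
              simp
        · rw [PySem.Dict.get?_insert_of_ne _ _ hsx]
          exact hget

theorem fFold_spec (s : String) (xs : List Int) : ∀ (k : Int) (d : PySem.Dict String Int),
    (((PySem.List.enumerate xs k).foldl fStep d).contains s
        = (d.contains s || decide (s ∈ xs.map PySem.Int.toStr)))
    ∧ (s ∉ xs.map PySem.Int.toStr →
      ((PySem.List.enumerate xs k).foldl fStep d).get? s = d.get? s)
    ∧ (d.contains s = true →
      ((PySem.List.enumerate xs k).foldl fStep d).get? s = d.get? s)
    ∧ (s ∈ xs.map PySem.Int.toStr → d.contains s = false →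
      ∃ i : Nat, i < xs.length ∧ (xs.map PySem.Int.toStr)[i]? = some s
        ∧ (∀ j : Nat, j < i → (xs.map PySem.Int.toStr)[j]? ≠ some s)
        ∧ ((PySem.List.enumerate xs k).foldl fStep d).get? s = some (k + i)) := by
  induction xs with
  | nil =>
    intro k d
    exact ⟨by simp [PySem.List.enumerate_nil], fun _ => rfl, fun _ => rfl, fun h => by simp at h⟩
  | cons x xs ih =>
    intro k d
    rw [PySem.List.enumerate_cons, List.foldl_cons]
    set d' := fStep d (k, x) with hd'
    have hd'c : ∀ u : String, d'.contains u = (u == PySem.Int.toStr x || d.contains u) := by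
      intro u
      rw [hd']
      unfold fStep
      by_cases h : d.contains (PySem.Int.toStr x) = true
      · rw [if_pos h]
        by_cases hu : u = PySem.Int.toStr x
        · simp [hu, h]
        · simp [hu]
      · rw [if_neg h]
        rw [PySem.Dict.contains_insert]
    have hd'g : ∀ u : String, u ≠ PySem.Int.toStr x → d'.get? u = d.get? u := by
      intro u hu
      rw [hd']
      unfold fStep
      by_cases h : d.contains (PySem.Int.toStr x) = true
      · rw [if_pos h]
      · rw [if_neg h, PySem.Dict.get?_insert_of_ne _ _ hu]
    refine ⟨?_, ?_, ?_, ?_⟩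
    · rw [(ih (k+1) d').1, hd'c]
      by_cases hsx : s = PySem.Int.toStr x
      · simp [hsx]
      · rw [show (s == PySem.Int.toStr x) = false from by simp [hsx], Bool.false_or]
        congr 1
        simp [hsx]
    · intro hmem
      have hsx : s ≠ PySem.Int.toStr x := fun h => hmem (by simp [h])
      rw [(ih (k+1) d').2.1 (fun h => hmem (by simp [h])), hd'g s hsx]
    · intro hdc
      have hd'cs : d'.contains s = true := by rw [hd'c]; simp [hdc]
      rw [(ih (k+1) d').2.2.1 hd'cs]
      by_cases hsx : s = PySem.Int.toStr x
      · rw [hd', hsx]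
        unfold fStep
        rw [if_pos (hsx ▸ hdc)]
      · exact hd'g s hsx
    · intro hmem hdc
      by_cases hsx : s = PySem.Int.toStr x
      · refine ⟨0, by simp, by simp [hsx], by omega, ?_⟩
        have hd'v : d'.get? s = some k := by
          rw [hd', hsx]
          unfold fStep
          rw [if_neg (by rw [← hsx]; simp [hdc]), PySem.Dict.get?_insert_self]
        have hd'cs : d'.contains s = true := by rw [hd'c, hsx]; simp
        rw [(ih (k+1) d').2.2.1 hd'cs, hd'v]
        simp
      · have hmem' : s ∈ xs.map PySem.Int.toStr := by
          rw [List.map_cons, List.mem_cons] at hmem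
          rcases hmem with h | h
          · exact absurd h hsx
          · exact h
        have hd'cs : d'.contains s = false := by
          rw [hd'c]
          simp only [Bool.or_eq_false_iff]
          exact ⟨by simpa using fun h => hsx h, hdc⟩
        obtain ⟨i, hi, hgi, hmin, hget⟩ := (ih (k+1) d').2.2.2 hmem' hd'cs
        refine ⟨i + 1, by simp; omega, by simpa using hgi, ?_, ?_⟩
        · intro j hj
          rcases Nat.eq_zero_or_pos j with rfl | hj0
          · simp only [List.map_cons, List.getElem?_cons_zero]
            intro h
            exact hsx (by injection h with h; exact h.symm)
          · obtain ⟨j', rfl⟩ : ∃ j', j = j' + 1 := ⟨j - 1, by omega⟩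
            simpa using hmin j' (by omega)
        · rw [hget]
          congr 1
          omega

-- ----- string surgery: str(n) contains no '|', so r.find('|') splits a rule exactly -----
theorem digitChar_ne_bar (k : Nat) (hk : k < 10) : Nat.digitChar k ≠ '|' := by
  interval_cases k <;> decide

theorem toDigitsCore_chars (b : Nat) (hb : 2 ≤ b) (hb' : b ≤ 10) :
    ∀ (f n : Nat) (acc : List Char), (∀ c ∈ acc, c ≠ '|') →
      ∀ c ∈ Nat.toDigitsCore b f n acc, c ≠ '|' := by
  intro f
  induction f with
  | zero => intro n acc hacc c hc; exact hacc c hc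
  | succ f ih =>
    intro n acc hacc c hc
    simp only [Nat.toDigitsCore] at hc
    split at hc
    · rcases List.mem_cons.mp hc with rfl | h
      · exact digitChar_ne_bar _ (lt_of_lt_of_le (Nat.mod_lt _ (by omega)) hb')
      · exact hacc _ h
    · exact ih _ _ (by
        intro c' hc'
        rcases List.mem_cons.mp hc' with rfl | h
        · exact digitChar_ne_bar _ (lt_of_lt_of_le (Nat.mod_lt _ (by omega)) hb')
        · exact hacc _ h) c hc

theorem bar_not_mem_toChars (n : Int) : '|' ∉ PySem.Int.toChars n := by
  unfold PySem.Int.toChars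
  intro h
  split at h
  · rcases List.mem_cons.mp h with h' | h'
    · exact absurd h'.symm (by decide)
    · exact toDigitsCore_chars 10 (by norm_num) (by norm_num) _ _ [] (by simp) _ h' rfl
  · exact toDigitsCore_chars 10 (by norm_num) (by norm_num) _ _ [] (by simp) _ h rfl

theorem bar_toList : ("|" : String).toList = ['|'] := by decide

theorem toList_ruleStr (u v : Int) :
    (ruleStr u v).toList = PySem.Int.toChars u ++ '|' :: PySem.Int.toChars v := by
  unfold ruleStr
  rw [String.toList_append, String.toList_append, PySem.Int.toList_toStr, PySem.Int.toList_toStr,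
    bar_toList]
  simp

theorem find_bar_eq (A B : List Char) (hA : '|' ∉ A) :
    PySem.Chars.find (A ++ '|' :: B) ['|'] = (A.length : Int) := by
  have hinf : ['|'] <:+: (A ++ '|' :: B) := ⟨A, B, by simp⟩
  have h0 : 0 ≤ PySem.Chars.find (A ++ '|' :: B) ['|'] :=
    (PySem.Chars.find_nonneg_iff _ _).mpr hinf
  obtain ⟨hpre, hmin⟩ := PySem.Chars.find_spec h0
  have hAl : ['|'] <+: (A ++ '|' :: B).drop A.length := by
    rw [List.drop_left]
    exact ⟨B, rfl⟩
  have hnotlt : ∀ i, i < A.length → ¬ (['|'] <+: (A ++ '|' :: B).drop i) := by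
    intro i hi hp
    obtain ⟨t, ht⟩ := hp
    have h00 : (List.drop i (A ++ '|' :: B))[0]? = some '|' := by rw [← ht]; rfl
    rw [List.getElem?_drop] at h00
    have hgi : (A ++ '|' :: B)[i]? = some '|' := by simpa using h00
    rw [List.getElem?_append_left (by omega)] at hgi
    exact hA (by
      have := List.getElem?_eq_some_iff.mp hgi
      obtain ⟨h', hv⟩ := this
      exact hv ▸ List.getElem_mem h')
  have hle : (PySem.Chars.find (A ++ '|' :: B) ['|']).toNat ≤ A.length := by
    by_contra hlt
    exact absurd hAl (hmin A.length (by omega))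
  have hge : A.length ≤ (PySem.Chars.find (A ++ '|' :: B) ['|']).toNat := by
    by_contra hlt
    exact absurd hpre (hnotlt _ (by omega))
  omega

theorem find_ruleStr (u v : Int) :
    PySem.Str.find (ruleStr u v) "|" = ((PySem.Int.toChars u).length : Int) := by
  rw [PySem.Str.find_eq, toList_ruleStr]
  exact find_bar_eq _ _ (bar_not_mem_toChars u)

-- find r '|' splits r into keyA, '|', keyB
theorem rule_decomp (r : String) (h : PySem.Str.find r "|" ≠ -1) :
    r.toList = (keyA r).toList ++ '|' :: (keyB r).toList ∧ '|' ∉ (keyA r).toList := by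
  have hfind : PySem.Str.find r "|" = PySem.Chars.find r.toList ['|'] := by
    rw [PySem.Str.find_eq, bar_toList]
  have h0 : 0 ≤ PySem.Chars.find r.toList ['|'] := by
    have := PySem.Chars.neg_one_le_find r.toList ['|']
    rw [hfind] at h
    omega
  obtain ⟨hpre, hmin⟩ := PySem.Chars.find_spec h0
  set c := (PySem.Chars.find r.toList ['|']).toNat with hc
  obtain ⟨t, ht⟩ := hpre
  have hdropc : r.toList.drop c = '|' :: t := by simpa using ht.symm
  have htt : t = r.toList.drop (c + 1) := by
    have := congrArg List.tail hdropc
    simpa [List.tail_drop] using this.symm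
  have hA : (keyA r).toList = r.toList.take c := by
    unfold keyA
    rw [PySem.Str.toList_slice, PySem.Chars.slice_eq_listSlice, hfind,
      PySem.List.slice_to _ h0]
  have hB : (keyB r).toList = r.toList.drop (c + 1) := by
    unfold keyB
    rw [PySem.Str.toList_slice, PySem.Chars.slice_eq_listSlice, hfind,
      PySem.List.slice_from _ (by omega : (0:Int) ≤ PySem.Chars.find r.toList ['|'] + 1)]
    congr 1
    omega
  constructor
  · rw [hA, hB, ← htt, ← hdropc, List.take_append_drop]
  · rw [hA]
    intro hmem
    rw [List.mem_iff_getElem] at hmem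
    obtain ⟨j, hj, hgj⟩ := hmem
    have hjr : j < r.toList.length := by
      have := hj
      simp only [List.length_take] at this
      omega
    have hjc : j < c := by
      have := hj
      simp only [List.length_take] at this
      omega
    apply hmin j hjc
    refine ⟨r.toList.drop (j + 1), ?_⟩
    have hgetj : r.toList[j] = '|' := by
      rw [← hgj, List.getElem_take]
    have hdj : r.toList.drop j = '|' :: r.toList.drop (j + 1) := by
      rw [List.drop_eq_getElem_cons hjr, hgetj]
    simp [hdj]

-- the two keys of a well-formed rule string
theorem keyA_ruleStr (u v : Int) : keyA (ruleStr u v) = PySem.Int.toStr u := by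
  apply String.toList_inj.mp
  unfold keyA
  rw [PySem.Str.toList_slice, PySem.Chars.slice_eq_listSlice, find_ruleStr,
    PySem.List.slice_to _ (by omega : (0:Int) ≤ ((PySem.Int.toChars u).length : Int)),
    toList_ruleStr, PySem.Int.toList_toStr]
  simp

theorem keyB_ruleStr (u v : Int) : keyB (ruleStr u v) = PySem.Int.toStr v := by
  apply String.toList_inj.mp
  unfold keyB
  rw [PySem.Str.toList_slice, PySem.Chars.slice_eq_listSlice, find_ruleStr,
    PySem.List.slice_from _ (by omega : (0:Int) ≤ ((PySem.Int.toChars u).length : Int) + 1),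
    toList_ruleStr, PySem.Int.toList_toStr]
  have h1 : (((PySem.Int.toChars u).length : Int) + 1).toNat
      = (PySem.Int.toChars u).length + 1 := by omega
  rw [h1, show PySem.Int.toChars u ++ '|' :: PySem.Int.toChars v
      = (PySem.Int.toChars u ++ ['|']) ++ PySem.Int.toChars v by simp,
    show (PySem.Int.toChars u).length + 1 = (PySem.Int.toChars u ++ ['|']).length by simp,
    List.drop_left]

-- a qualifying rule IS the rule string of its two keys
theorem rule_eq_of_decomp (r : String) (u v : Int)
    (h : PySem.Str.find r "|" ≠ -1)
    (hu : keyA r = PySem.Int.toStr u) (hv : keyB r = PySem.Int.toStr v) :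
    r = ruleStr u v := by
  apply String.toList_inj.mp
  rw [(rule_decomp r h).1, toList_ruleStr, hu, hv, PySem.Int.toList_toStr, PySem.Int.toList_toStr]

-- sum of Int casts
theorem sum_map_intCast {alpha : Type} (S : List alpha) (f : alpha → Nat) :
    (S.map (fun a => (f a : Int))).sum = ((S.map f).sum : Int) := by
  induction S with
  | nil => rfl
  | cons a S ih => simp [ih]

-- split a count at one value
theorem countP_split (L : List String) (P : String → Bool) (s : String) :
    L.countP P = L.countP (fun t => P t && (t == s)) + L.countP (fun t => P t && !(t == s)) := by
  induction L with
  | nil => rfl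
  | cons a L ihL =>
    rw [List.countP_cons, List.countP_cons, List.countP_cons, ihL]
    by_cases has : a = s
    · by_cases hap : P a = true <;> simp [has, hap] <;> omega
    · by_cases hap : P a = true <;> simp [has, hap] <;> omega

-- counting by predicate = summing multiplicities over the distinct matching values
theorem countP_eq_sum_counts (L : List String) (P : String → Bool) :
    ∀ (S : List String), S.Nodup → (∀ s, s ∈ S ↔ (s ∈ L ∧ P s = true)) →
      (S.map (fun s => L.count s)).sum = L.countP P := by
  intro S
  induction S generalizing P with
  | nil =>
    intro _ hmem
    rw [List.map_nil, List.sum_nil]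
    symm
    rw [List.countP_eq_zero]
    intro t ht hPt
    have := (hmem t).mpr ⟨ht, hPt⟩
    simp at this
  | cons s S ih =>
    intro hnd hmem
    have hPs : P s = true := ((hmem s).mp (by simp)).2
    have hsplit := countP_split L P s
    have h1 : L.countP (fun t => P t && (t == s)) = L.count s := by
      rw [List.count_eq_countP]
      apply List.countP_congr
      intro t _
      by_cases hts : t = s
      · simp [hts, hPs]
      · simp [hts]
    have h2 : (S.map (fun t => L.count t)).sum = L.countP (fun t => P t && !(t == s)) := by
      apply ih
      · exact (List.nodup_cons.mp hnd).2
      · intro t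
        constructor
        · intro htS
          have hts : t ≠ s := fun h => (List.nodup_cons.mp hnd).1 (h ▸ htS)
          have := (hmem t).mp (by simp [htS])
          simp [this.1, this.2, hts]
        · intro ⟨htL, htP⟩
          rcases Bool.and_eq_true _ _ |>.mp htP with ⟨hP, hne⟩
          have : t ∈ s :: S := (hmem t).mpr ⟨htL, hP⟩
          rcases List.mem_cons.mp this with rfl | h
          · simp at hne
          · exact h
    rw [List.map_cons, List.sum_cons, hsplit, h1, h2]

-- the pred dictionary sums the page counts of all qualifying rules ending in the given key
theorem pred_getD (manual : List Int) (l : List String) (s : String) :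
    (l.foldl (predStep manual) PySem.Dict.empty).getD s 0
      = ((l.filter (fun r => qual2 manual r && (keyB r == s))).map
          (fun r => (countD manual).getD (keyA r) 0)).sum := by
  induction l using List.reverseRecOn with
  | nil => rfl
  | append_singleton l r ih =>
    rw [List.foldl_append, List.foldl_cons, List.foldl_nil, List.filter_append]
    by_cases hq : qual2 manual r = true
    · rw [show predStep manual (l.foldl (predStep manual) PySem.Dict.empty) r
          = (l.foldl (predStep manual) PySem.Dict.empty).insert (keyB r)
              ((l.foldl (predStep manual) PySem.Dict.empty).getD (keyB r) 0
                + (countD manual).getD (keyA r) 0) from by unfold predStep; rw [if_pos hq]]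
      by_cases hks : keyB r = s
      · rw [hks, PySem.Dict.getD_insert_self, ih,
          show (List.filter (fun r => qual2 manual r && (keyB r == s)) [r]) = [r] from by
            simp [hq, hks]]
        simp
      · rw [PySem.Dict.getD_insert_of_ne _ _ _ (fun h => hks h.symm), ih,
          show (List.filter (fun r => qual2 manual r && (keyB r == s)) [r]) = [] from by
            simp [hks]]
        simp
    · rw [show predStep manual (l.foldl (predStep manual) PySem.Dict.empty) r
          = l.foldl (predStep manual) PySem.Dict.empty from by unfold predStep; rw [if_neg hq],
        ih, show (List.filter (fun r => qual2 manual r && (keyB r == s)) [r]) = [] from by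
          simp [Bool.not_eq_true _ |>.mp hq]]
      simp

-- stored first/last values with their defining properties
theorem firstD_spec (manual : List Int) (s : String) (hs : s ∈ manual.map PySem.Int.toStr) :
    ∃ fb : Nat, fb < manual.length ∧ (manual.map PySem.Int.toStr)[fb]? = some s
      ∧ (∀ j : Nat, j < fb → (manual.map PySem.Int.toStr)[j]? ≠ some s)
      ∧ (firstD manual).getD s 0 = (fb : Int) := by
  obtain ⟨fb, hl, hg, hmin, hget⟩ :=
    (fFold_spec s manual 0 PySem.Dict.empty).2.2.2 (by simpa using hs) (by simp)
  refine ⟨fb, by simpa using hl, hg, hmin, ?_⟩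
  unfold firstD
  rw [PySem.Dict.getD_eq_get?_getD, hget]
  simp

theorem lastD_spec (manual : List Int) (s : String) (hs : s ∈ manual.map PySem.Int.toStr) :
    ∃ la : Nat, la < manual.length ∧ (manual.map PySem.Int.toStr)[la]? = some s
      ∧ (∀ j : Nat, la < j → (manual.map PySem.Int.toStr)[j]? ≠ some s)
      ∧ (lastD manual).getD s 0 = (la : Int) := by
  obtain ⟨la, hl, hg, hmax, hget⟩ := (lFold_spec s manual 0 PySem.Dict.empty).2 (by simpa using hs)
  refine ⟨la, by simpa using hl, hg, hmax, ?_⟩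
  unfold lastD
  rw [PySem.Dict.getD_eq_get?_getD, hget]
  simp

-- B's inversion test over the rule set detects exactly a violated pair
theorem qualInv_any_iff (manual : List Int) (rules : List String) :
    ((PySem.Set.ofList rules).any (qualInv manual) = true)
      ↔ ¬ manual.Pairwise (fun a b => ordR rules b a = false) := by
  constructor
  · intro hany hpair
    rw [List.any_eq_true] at hany
    obtain ⟨r, hrS, hq⟩ := hany
    rcases Bool.and_eq_true _ _ |>.mp hq with ⟨hq2, hltb⟩
    rcases Bool.and_eq_true _ _ |>.mp hq2 with ⟨hfindb, hAB⟩
    rcases Bool.and_eq_true _ _ |>.mp hAB with ⟨hcA, hcB⟩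
    have hfind : PySem.Str.find r "|" ≠ -1 := of_decide_eq_true hfindb
    have hAL : keyA r ∈ manual.map PySem.Int.toStr := (countD_contains _ _).mp hcA
    have hBL : keyB r ∈ manual.map PySem.Int.toStr := (countD_contains _ _).mp hcB
    obtain ⟨fb, hfbl, hgfb, _, hfbD⟩ := firstD_spec manual (keyB r) hBL
    obtain ⟨la, hlal, hgla, _, hlaD⟩ := lastD_spec manual (keyA r) hAL
    have hlt : fb < la := by
      have := of_decide_eq_true hltb
      rw [hfbD, hlaD] at this
      exact_mod_cast this
    have hfm : PySem.Int.toStr (manual[fb]'hfbl) = keyB r := by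
      rw [List.getElem?_map, List.getElem?_eq_getElem hfbl] at hgfb
      simpa using hgfb
    have hlm : PySem.Int.toStr (manual[la]'hlal) = keyA r := by
      rw [List.getElem?_map, List.getElem?_eq_getElem hlal] at hgla
      simpa using hgla
    have hr : r = ruleStr (manual[la]'hlal) (manual[fb]'hfbl) :=
      rule_eq_of_decomp r _ _ hfind hlm.symm hfm.symm
    have hpg := (List.pairwise_iff_getElem.mp hpair) fb la hfbl hlal hlt
    unfold ordR at hpg
    rw [← hr] at hpg
    have hrm : r ∈ rules := (PySem.Set.mem_ofList _ _).mp hrS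
    rw [List.contains_eq_mem, decide_eq_false_iff_not] at hpg
    exact hpg hrm
  · intro hnp
    have hex : ∃ (i j : Nat) (hi : i < manual.length) (hj : j < manual.length),
        i < j ∧ ordR rules (manual[j]'hj) (manual[i]'hi) = true := by
      by_contra hno
      push_neg at hno
      apply hnp
      rw [List.pairwise_iff_getElem]
      intro i j hi hj hij
      rcases h : ordR rules (manual[j]'hj) (manual[i]'hi) with _ | _
      · rfl
      · exact absurd h (hno i j hi hj hij)
    obtain ⟨i, j, hi, hj, hij, hord⟩ := hex
    have hrm : ruleStr (manual[j]'hj) (manual[i]'hi) ∈ rules := by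
      unfold ordR at hord
      rw [List.contains_eq_mem, decide_eq_true_eq] at hord
      exact hord
    rw [List.any_eq_true]
    refine ⟨ruleStr (manual[j]'hj) (manual[i]'hi), (PySem.Set.mem_ofList _ _).mpr hrm, ?_⟩
    set r := ruleStr (manual[j]'hj) (manual[i]'hi) with hrdef
    have hkA : keyA r = PySem.Int.toStr (manual[j]'hj) := keyA_ruleStr _ _
    have hkB : keyB r = PySem.Int.toStr (manual[i]'hi) := keyB_ruleStr _ _
    have hfind : PySem.Str.find r "|" ≠ -1 := by
      rw [hrdef, find_ruleStr]
      intro hcon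
      omega
    have hAL : keyA r ∈ manual.map PySem.Int.toStr := by
      rw [hkA]
      exact List.mem_map.mpr ⟨_, List.getElem_mem hj, rfl⟩
    have hBL : keyB r ∈ manual.map PySem.Int.toStr := by
      rw [hkB]
      exact List.mem_map.mpr ⟨_, List.getElem_mem hi, rfl⟩
    obtain ⟨fb, hfbl, hgfb, hminfb, hfbD⟩ := firstD_spec manual (keyB r) hBL
    obtain ⟨la, hlal, hgla, hmaxla, hlaD⟩ := lastD_spec manual (keyA r) hAL
    have hfb_le : fb ≤ i := by
      by_contra hcon
      push_neg at hcon
      exact hminfb i hcon (by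
        rw [List.getElem?_map, List.getElem?_eq_getElem hi, hkB]
        rfl)
    have hj_le : j ≤ la := by
      by_contra hcon
      push_neg at hcon
      exact hmaxla j hcon (by
        rw [List.getElem?_map, List.getElem?_eq_getElem hj, hkA]
        rfl)
    unfold qualInv qual2
    rw [decide_eq_true hfind, (countD_contains _ _).mpr hAL, (countD_contains _ _).mpr hBL,
      hfbD, hlaD, decide_eq_true (by exact_mod_cast lt_of_le_of_lt hfb_le (lt_of_lt_of_le hij (by exact_mod_cast hj_le)) : (fb : Int) < (la : Int))]
    rfl

-- strings of the form a|b
theorem toList_mid (a b : String) : (a ++ "|" ++ b).toList = a.toList ++ '|' :: b.toList := by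
  rw [String.toList_append, String.toList_append, bar_toList]
  simp

-- the pred dictionary holds exactly the predecessor counts of A's comparator
theorem predD_getD_eq (manual : List Int) (rules : List String) (x : Int) (hx : x ∈ manual) :
    (predD manual rules).getD (PySem.Int.toStr x) 0
      = ((manual.countP (fun y => ordR rules y x)) : Int) := by
  unfold predD
  rw [pred_getD]
  have hmapval : ((PySem.Set.ofList rules).filter
        (fun r => qual2 manual r && (keyB r == PySem.Int.toStr x))).map
          (fun r => (countD manual).getD (keyA r) 0)
      = (((PySem.Set.ofList rules).filter
          (fun r => qual2 manual r && (keyB r == PySem.Int.toStr x))).map keyA).map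
            (fun s => (((manual.map PySem.Int.toStr).count s) : Int)) := by
    rw [List.map_map]
    apply List.map_congr_left
    intro r _
    rw [Function.comp_apply, countD_getD]
  rw [hmapval, sum_map_intCast]
  have hmm : ∀ s, s ∈ ((PySem.Set.ofList rules).filter
        (fun r => qual2 manual r && (keyB r == PySem.Int.toStr x))).map keyA
      ↔ (s ∈ manual.map PySem.Int.toStr
          ∧ (fun s => rules.contains (s ++ "|" ++ PySem.Int.toStr x)) s = true) := by
    intro s
    constructor
    · intro hsm
      obtain ⟨r, hrF, rfl⟩ := List.mem_map.mp hsm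
      rcases Bool.and_eq_true _ _ |>.mp ((List.mem_filter.mp hrF).2) with ⟨hq2, hkBt⟩
      rcases Bool.and_eq_true _ _ |>.mp hq2 with ⟨hfindb, hAB⟩
      rcases Bool.and_eq_true _ _ |>.mp hAB with ⟨hcA, _⟩
      have hfind : PySem.Str.find r "|" ≠ -1 := of_decide_eq_true hfindb
      have hAL : keyA r ∈ manual.map PySem.Int.toStr := (countD_contains _ _).mp hcA
      refine ⟨hAL, ?_⟩
      have hkB : keyB r = PySem.Int.toStr x := by simpa using hkBt
      have hreq : keyA r ++ "|" ++ PySem.Int.toStr x = r := by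
        apply String.toList_inj.mp
        rw [toList_mid, (rule_decomp r hfind).1, hkB]
      show rules.contains (keyA r ++ "|" ++ PySem.Int.toStr x) = true
      rw [hreq, List.contains_eq_mem, decide_eq_true_eq]
      exact (PySem.Set.mem_ofList _ _).mp (List.mem_of_mem_filter hrF)
    · intro ⟨hsL, hPs⟩
      obtain ⟨u, huM, hus⟩ := List.mem_map.mp hsL
      have hreq : s ++ "|" ++ PySem.Int.toStr x = ruleStr u x := by
        rw [← hus]; rfl
      have hrm : ruleStr u x ∈ rules := by
        have hPs' : rules.contains (s ++ "|" ++ PySem.Int.toStr x) = true := hPs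
        rw [hreq, List.contains_eq_mem, decide_eq_true_eq] at hPs'
        exact hPs'
      refine List.mem_map.mpr ⟨ruleStr u x,
        List.mem_filter.mpr ⟨(PySem.Set.mem_ofList _ _).mpr hrm, ?_⟩,
        by rw [keyA_ruleStr, hus]⟩
      unfold qual2
      rw [keyA_ruleStr, keyB_ruleStr,
        decide_eq_true (by rw [find_ruleStr]; intro hcon; omega :
          PySem.Str.find (ruleStr u x) "|" ≠ -1),
        (countD_contains _ _).mpr (by rw [hus]; exact hsL),
        (countD_contains _ _).mpr (List.mem_map.mpr ⟨x, hx, rfl⟩)]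
      simp
  have hnd : (((PySem.Set.ofList rules).filter
      (fun r => qual2 manual r && (keyB r == PySem.Int.toStr x))).map keyA).Nodup := by
    apply (List.nodup_map_iff_inj_on (List.Nodup.filter _ (PySem.Set.nodup_ofList rules))).mpr
    intro r1 h1 r2 h2 hk
    rcases Bool.and_eq_true _ _ |>.mp ((List.mem_filter.mp h1).2) with ⟨hq1, hkB1⟩
    rcases Bool.and_eq_true _ _ |>.mp hq1 with ⟨hf1, _⟩
    rcases Bool.and_eq_true _ _ |>.mp ((List.mem_filter.mp h2).2) with ⟨hq2, hkB2⟩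
    rcases Bool.and_eq_true _ _ |>.mp hq2 with ⟨hf2, _⟩
    apply String.toList_inj.mp
    rw [(rule_decomp r1 (of_decide_eq_true hf1)).1, (rule_decomp r2 (of_decide_eq_true hf2)).1,
      hk, show keyB r1 = keyB r2 from by
        rw [(by simpa using hkB1 : keyB r1 = PySem.Int.toStr x),
          (by simpa using hkB2 : keyB r2 = PySem.Int.toStr x)]]
  rw [countP_eq_sum_counts (manual.map PySem.Int.toStr)
    (fun s => rules.contains (s ++ "|" ++ PySem.Int.toStr x)) _ hnd hmm]
  congr 1
  rw [List.countP_map]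
  exact List.countP_congr (fun y _ => Iff.rfl)

-- B's port, with its three loops named
theorem alt_eq (manual : List Int) (rules : List String) :
    middle_page_alt manual rules =
      if (PySem.Set.ofList rules).any (qualInv manual) = false then (0:Int)
      else (manual.find? (fun x => (predD manual rules).getD (PySem.Int.toStr x) 0
            == PySem.Int.floordiv ((manual.length : Int) - 1) 2)).getD 0 := by
  unfold middle_page_alt
  rw [show (fun (cfl : (PySem.Dict String Int × PySem.Dict String Int) × PySem.Dict String Int)
        (p : Int × Int) =>
      ((cfl.1.1.insert (PySem.Int.toStr p.2) (cfl.1.1.getD (PySem.Int.toStr p.2) 0 + 1),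
        if cfl.1.2.contains (PySem.Int.toStr p.2) then cfl.1.2
        else cfl.1.2.insert (PySem.Int.toStr p.2) p.1),
       cfl.2.insert (PySem.Int.toStr p.2) p.1))
    = (fun cfl p => ((cStep cfl.1.1 p, fStep cfl.1.2 p), lStep cfl.2 p)) from rfl,
    foldl_step3]
  dsimp only
  rw [show (PySem.List.enumerate manual).foldl cStep PySem.Dict.empty = countD manual from rfl,
    show (PySem.List.enumerate manual).foldl fStep PySem.Dict.empty = firstD manual from rfl,
    show (PySem.List.enumerate manual).foldl lStep PySem.Dict.empty = lastD manual from rfl]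
  rw [show (fun (po : PySem.Dict String Int × Bool) (r : String) =>
      if PySem.Str.find r "|" ≠ -1 then
        if (countD manual).contains (PySem.Str.slice r none (some (PySem.Str.find r "|")))
            && (countD manual).contains (PySem.Str.slice r (some (PySem.Str.find r "|" + 1)) none) then
          (po.1.insert (PySem.Str.slice r (some (PySem.Str.find r "|" + 1)) none)
            (po.1.getD (PySem.Str.slice r (some (PySem.Str.find r "|" + 1)) none) 0
              + (countD manual).getD (PySem.Str.slice r none (some (PySem.Str.find r "|"))) 0),
           if (firstD manual).getD (PySem.Str.slice r (some (PySem.Str.find r "|" + 1)) none) 0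
              < (lastD manual).getD (PySem.Str.slice r none (some (PySem.Str.find r "|"))) 0 then false
           else po.2)
        else po
      else po)
    = (fun po r =>
      if PySem.Str.find r "|" ≠ -1 then
        if (countD manual).contains (keyA r) && (countD manual).contains (keyB r) then
          (po.1.insert (keyB r) (po.1.getD (keyB r) 0 + (countD manual).getD (keyA r) 0),
           if (firstD manual).getD (keyB r) 0 < (lastD manual).getD (keyA r) 0 then false
           else po.2)
        else po
      else po) from rfl,
    foldl_po]
  dsimp only
  rw [ordered_eq_any]
  rw [show (PySem.Set.ofList rules).foldl (predStep manual) PySem.Dict.empty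
      = predD manual rules from rfl]
  by_cases h : (PySem.Set.ofList rules).any (qualInv manual) = false
  · rw [h, if_pos rfl]
    rfl
  · rw [Bool.not_eq_false] at h
    rw [h]
    rw [if_neg (by simp)]
    rfl

-- ===== VERDICT (by name: the statement is the Claim_ definition above) =====
theorem middle_page_spec : Claim_equal_middle_page := by
  intro manual rules hDom hPre
  unfold Spec_middle_page middle_page
  rw [alt_eq]
  by_cases hg : manual.Pairwise (fun a b => ordR rules b a = false)
  · rw [if_pos ((flagA_iff manual rules).mpr hg)]
    have hany : (PySem.Set.ofList rules).any (qualInv manual) = false := by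
      rcases h : (PySem.Set.ofList rules).any (qualInv manual) with _ | _
      · rfl
      · exact absurd hg ((qualInv_any_iff manual rules).mp h)
    rw [if_pos hany]
  · rcases hPre with hPre | ⟨hodd, hnd, hI, hT, hTr⟩
    · exact absurd hPre hg
    rw [if_neg (by rw [flagA_iff]; exact hg)]
    rw [if_neg (by rw [(qualInv_any_iff manual rules).mpr hg]; simp)]
    -- the sorted manual
    set s := sortCompA rules manual with hs
    have hperm : s.Perm manual := perm_sortCompA rules manual
    have hlen : s.length = manual.length := hperm.length_eq
    have hn1 : 1 ≤ manual.length := by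
      rcases manual with _ | ⟨a, l⟩
      · exact absurd List.Pairwise.nil hg
      · simp
    set k : Nat := (manual.length - 1) / 2 with hk
    have hklt : k < manual.length := by omega
    have hsp : s.Pairwise (fun a b => ordR rules a b = true) :=
      pairwise_sortCompA rules manual hT hTr manual (fun z hz => hz) hnd
    have hkls : k < s.length := by omega
    -- A's index arithmetic
    have hidxA : PySem.Int.floordiv ((s.length : Int) - 1) 2 = (k : Int) := by
      have h1 : ((s.length : Int) - 1) = ((manual.length - 1 : Nat) : Int) := by
        rw [hlen]; omega
      rw [h1]
      exact_mod_cast PySem.Int.floordiv_natCast (manual.length - 1) 2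
    have hA : PySem.List.pyGetD s (PySem.Int.floordiv ((s.length : Int) - 1) 2) 0 = s[k] := by
      rw [hidxA, PySem.List.pyGetD_natCast, List.getD_eq_getElem s 0 hkls]
    rw [hA]
    -- B's half
    have hhalf : PySem.Int.floordiv ((manual.length : Int) - 1) 2 = (k : Int) := by
      have h1 : ((manual.length : Int) - 1) = ((manual.length - 1 : Nat) : Int) := by omega
      rw [h1]
      exact_mod_cast PySem.Int.floordiv_natCast (manual.length - 1) 2
    rw [hhalf]
    -- counts transfer from manual to s by permutation
    have hcnt : ∀ x : Int, manual.countP (fun y => ordR rules y x)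
        = s.countP (fun y => ordR rules y x) := by
      intro x; exact (hperm.countP_eq _).symm
    -- s[k] satisfies the predicate; every element satisfying it equals s[k]
    have hself : manual.countP (fun y => ordR rules y s[k]) = k := by
      rw [hcnt]
      exact countP_eq_index rules manual s (fun z hz => hperm.mem_iff.mp hz) hI hT hsp k hkls
    have huniq : ∀ x ∈ manual, manual.countP (fun y => ordR rules y x) = k → x = s[k] := by
      intro x hx hcx
      have hxs : x ∈ s := hperm.mem_iff.mpr hx
      rw [List.mem_iff_getElem] at hxs
      obtain ⟨m, hm, rfl⟩ := hxs
      have := countP_eq_index rules manual s (fun z hz => hperm.mem_iff.mp hz) hI hT hsp m hm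
      rw [hcnt] at hcx
      have hmk : m = k := by omega
      subst hmk; rfl
    have hfind : manual.find? (fun x =>
        (predD manual rules).getD (PySem.Int.toStr x) 0 == (k : Int)) = some s[k] := by
      apply find?_eq_some_of
      · have hmem : s[k] ∈ manual := hperm.mem_iff.mp (List.getElem_mem _)
        refine ⟨s[k], hmem, ?_⟩
        rw [predD_getD_eq manual rules s[k] hmem, hself]
        simp
      · intro x hx hpx
        rw [predD_getD_eq manual rules x hx] at hpx
        simp only [beq_iff_eq, Int.natCast_inj] at hpx
        exact huniq x hx (by exact_mod_cast hpx)
    rw [hfind]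
    rfl
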